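-- pv_equiv track=rewrite | github.com/Oradroc/PCR_ML_model | PredictMyPCRS_V2/NickFunctions.py | ChangeName
-- ===== SOURCE A (Python) =====
-- def ChangeName(polymerase):
--     '''
--     Description:
--     ------------
--     Crude function that takes polymerase name from common user input and changes to simplified polymerase name for key use in "Buffer"  function. Can also be written using polymerase catalog number, but was easier to manually lookup and confirm concentrations by name.
--
--     Parameters:
--     ------------
--     polymerase, str: original polymerase name from user input. Users typically input the same name, but this function will have to be manually modified based on new polymerase values. Can be simplified with the polymerase catalog number.
--
--     Return:
--     ------------
--     Simplified polymerase name as a string.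
--
--
--     '''
--     Taq=['Taq','Taq DNA Polymerase']
--     for Pol in Taq:
--         if Pol==polymerase:
--             return "Taq"
--     Custom=['Custom','Custom Pfu']
--     for Pol in Custom:
--         if Pol==polymerase:
--             return  "Custom"
--     SuperMix=['SuperMix','PCR SuperMix High Fidelity','PCR SuperMix High Fidelity - Invitrogen/10790020','Platinum PCR SuperMix High Fidelity','Platinum SuperMix High Fidelity','Platinum PCR SuperMix High Fidelity - Invitrogen/12532016']
--     for Pol in SuperMix:
--         if Pol==polymerase:
--             return "SuperMix"
--     # NEED TO REMOVE LINES WITH QUICKCHANGE LIGHTNING TEMPORARY FIX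
--     Pfu=['Pfu','QuikChange Lightning Enzyme','Pfu Turbo','PfuTurbo DNA Polymerase - Agilent/600250 ','PfuUltra High-Fidelity DNA Polymerase','PFU Ultra HF polymerase','PfuTurbo Cx Hotstart DNA Polymerase']
--     for Pol in Pfu:
--         if Pol==polymerase:
--             return "Pfu"
--     PhusionHF=['PhusionHF','Phusion High-Fidelity PCR Master Mix with HF Buffer','Phusion High-Fidelity PCR Master Mix with HF Buffer - NEB/M0531S','Phusion DNA polymerase','Phusion Hot Start II High-Fidelity DNA Polymerase','Phusion HF master mix']
--     for Pol in PhusionHF: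
--         if Pol==polymerase:
--             return "PhusionHF"
--     Vent=['Vent','Vent DNA Polymerase']
--     for Pol in Vent:
--         if Pol==polymerase:
--             return "Vent"
--     PrimeSTAR=['PrimeSTAR','PrimeSTAR HS DNA Polymerase - Takara/R010A']
--     for Pol in PrimeSTAR:
--         if Pol==polymerase:
--             return "PrimeSTAR"
--     LongAmp=['LongAmp','LongAmp Taq DNA Polymerase - NEB/M0323S','LongAmp Taq DNA Polymerase']
--     for Pol in LongAmp:
--         if Pol==polymerase:
--             return "LongAmp"
--     #if has not been found
--     Q5=['Q5','Q5 High-Fidelity DNA Polymerase']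
--     for Pol in Q5:
--         if Pol==polymerase:
--             return 'Q5'
--     return None
-- ===== SOURCE B (Python) =====
-- # Binary search over one flat (name, key) table kept sorted by name,
-- # instead of A's nine group lists scanned sequentially.
-- _TABLE = [
--     ('Custom', 'Custom'),
--     ('Custom Pfu', 'Custom'),
--     ('LongAmp', 'LongAmp'),
--     ('LongAmp Taq DNA Polymerase', 'LongAmp'),
--     ('LongAmp Taq DNA Polymerase - NEB/M0323S', 'LongAmp'),
--     ('PCR SuperMix High Fidelity', 'SuperMix'),
--     ('PCR SuperMix High Fidelity - Invitrogen/10790020', 'SuperMix'),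
--     ('PFU Ultra HF polymerase', 'Pfu'),
--     ('Pfu', 'Pfu'),
--     ('Pfu Turbo', 'Pfu'),
--     ('PfuTurbo Cx Hotstart DNA Polymerase', 'Pfu'),
--     ('PfuTurbo DNA Polymerase - Agilent/600250 ', 'Pfu'),
--     ('PfuUltra High-Fidelity DNA Polymerase', 'Pfu'),
--     ('Phusion DNA polymerase', 'PhusionHF'),
--     ('Phusion HF master mix', 'PhusionHF'),
--     ('Phusion High-Fidelity PCR Master Mix with HF Buffer', 'PhusionHF'),
--     ('Phusion High-Fidelity PCR Master Mix with HF Buffer - NEB/M0531S', 'PhusionHF'),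
--     ('Phusion Hot Start II High-Fidelity DNA Polymerase', 'PhusionHF'),
--     ('PhusionHF', 'PhusionHF'),
--     ('Platinum PCR SuperMix High Fidelity', 'SuperMix'),
--     ('Platinum PCR SuperMix High Fidelity - Invitrogen/12532016', 'SuperMix'),
--     ('Platinum SuperMix High Fidelity', 'SuperMix'),
--     ('PrimeSTAR', 'PrimeSTAR'),
--     ('PrimeSTAR HS DNA Polymerase - Takara/R010A', 'PrimeSTAR'),
--     ('Q5', 'Q5'),
--     ('Q5 High-Fidelity DNA Polymerase', 'Q5'),
--     ('QuikChange Lightning Enzyme', 'Pfu'),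
--     ('SuperMix', 'SuperMix'),
--     ('Taq', 'Taq'),
--     ('Taq DNA Polymerase', 'Taq'),
--     ('Vent', 'Vent'),
--     ('Vent DNA Polymerase', 'Vent'),
-- ]
--
-- def ChangeName(polymerase):
--     lo, hi = 0, len(_TABLE)
--     while lo < hi:
--         mid = (lo + hi) // 2
--         name, key = _TABLE[mid]
--         if name == polymerase:
--             return key
--         if name < polymerase:
--             lo = mid + 1
--         else:
--             hi = mid
--     return None
-- ===== Notes on version B (the rewrite author's own statement) =====
-- stated objective: alternative
-- what changed: Replaced nine hard-coded group lists each scanned by its own sequential for-loop with one flat (name, key) table kept sorted by name and a lo/hi binary-search loop over it, so the lookup halves the interval instead of scanning groups in order.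
import Mathlib
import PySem

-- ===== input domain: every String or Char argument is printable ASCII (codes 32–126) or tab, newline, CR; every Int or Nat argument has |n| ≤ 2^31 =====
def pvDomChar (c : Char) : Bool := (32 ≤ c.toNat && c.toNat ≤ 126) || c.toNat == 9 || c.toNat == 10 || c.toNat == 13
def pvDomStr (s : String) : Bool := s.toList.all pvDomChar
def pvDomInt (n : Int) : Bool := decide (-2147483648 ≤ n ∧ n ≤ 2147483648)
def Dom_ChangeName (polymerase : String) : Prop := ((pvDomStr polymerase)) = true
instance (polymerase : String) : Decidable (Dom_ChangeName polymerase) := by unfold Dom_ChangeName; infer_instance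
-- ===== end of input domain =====

-- B replaces A's nine group lists scanned by sequential for-loops with a lo/hi binary search over one flat (name, key) table sorted by name (alternative algorithm; same exact-match, None-default behaviour).

-- ===== PORT A =====
-- step-for-step: each Python group list + its for-loop becomes pyScan; each early 'return' becomes tryNext
def pyScan (xs : List String) (polymerase ret : String) : Option String :=
  match xs with
  | [] => none
  | pol :: rest => if pol == polymerase then some ret else pyScan rest polymerase ret

-- 'if the group scan returned, return it; otherwise fall through to the next group'
def tryNext (o next : Option String) : Option String :=
  match o with
  | some r => some r
  | none => next

def ChangeName (polymerase : String) : Option String :=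
  (tryNext (pyScan ["Taq", "Taq DNA Polymerase"] polymerase "Taq")
   (tryNext (pyScan ["Custom", "Custom Pfu"] polymerase "Custom")
    (tryNext (pyScan ["SuperMix", "PCR SuperMix High Fidelity", "PCR SuperMix High Fidelity - Invitrogen/10790020", "Platinum PCR SuperMix High Fidelity", "Platinum SuperMix High Fidelity", "Platinum PCR SuperMix High Fidelity - Invitrogen/12532016"] polymerase "SuperMix")
     (tryNext (pyScan ["Pfu", "QuikChange Lightning Enzyme", "Pfu Turbo", "PfuTurbo DNA Polymerase - Agilent/600250 ", "PfuUltra High-Fidelity DNA Polymerase", "PFU Ultra HF polymerase", "PfuTurbo Cx Hotstart DNA Polymerase"] polymerase "Pfu")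
      (tryNext (pyScan ["PhusionHF", "Phusion High-Fidelity PCR Master Mix with HF Buffer", "Phusion High-Fidelity PCR Master Mix with HF Buffer - NEB/M0531S", "Phusion DNA polymerase", "Phusion Hot Start II High-Fidelity DNA Polymerase", "Phusion HF master mix"] polymerase "PhusionHF")
       (tryNext (pyScan ["Vent", "Vent DNA Polymerase"] polymerase "Vent")
        (tryNext (pyScan ["PrimeSTAR", "PrimeSTAR HS DNA Polymerase - Takara/R010A"] polymerase "PrimeSTAR")
         (tryNext (pyScan ["LongAmp", "LongAmp Taq DNA Polymerase - NEB/M0323S", "LongAmp Taq DNA Polymerase"] polymerase "LongAmp")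
          (tryNext (pyScan ["Q5", "Q5 High-Fidelity DNA Polymerase"] polymerase "Q5")
           none)))))))))

-- ===== PORT B =====
-- the flat table, kept sorted by name (codepoint order, as in Source B)
def bTable : List (String × String) :=
  [("Custom", "Custom"),
   ("Custom Pfu", "Custom"),
   ("LongAmp", "LongAmp"),
   ("LongAmp Taq DNA Polymerase", "LongAmp"),
   ("LongAmp Taq DNA Polymerase - NEB/M0323S", "LongAmp"),
   ("PCR SuperMix High Fidelity", "SuperMix"),
   ("PCR SuperMix High Fidelity - Invitrogen/10790020", "SuperMix"),
   ("PFU Ultra HF polymerase", "Pfu"),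
   ("Pfu", "Pfu"),
   ("Pfu Turbo", "Pfu"),
   ("PfuTurbo Cx Hotstart DNA Polymerase", "Pfu"),
   ("PfuTurbo DNA Polymerase - Agilent/600250 ", "Pfu"),
   ("PfuUltra High-Fidelity DNA Polymerase", "Pfu"),
   ("Phusion DNA polymerase", "PhusionHF"),
   ("Phusion HF master mix", "PhusionHF"),
   ("Phusion High-Fidelity PCR Master Mix with HF Buffer", "PhusionHF"),
   ("Phusion High-Fidelity PCR Master Mix with HF Buffer - NEB/M0531S", "PhusionHF"),
   ("Phusion Hot Start II High-Fidelity DNA Polymerase", "PhusionHF"),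
   ("PhusionHF", "PhusionHF"),
   ("Platinum PCR SuperMix High Fidelity", "SuperMix"),
   ("Platinum PCR SuperMix High Fidelity - Invitrogen/12532016", "SuperMix"),
   ("Platinum SuperMix High Fidelity", "SuperMix"),
   ("PrimeSTAR", "PrimeSTAR"),
   ("PrimeSTAR HS DNA Polymerase - Takara/R010A", "PrimeSTAR"),
   ("Q5", "Q5"),
   ("Q5 High-Fidelity DNA Polymerase", "Q5"),
   ("QuikChange Lightning Enzyme", "Pfu"),
   ("SuperMix", "SuperMix"),
   ("Taq", "Taq"),
   ("Taq DNA Polymerase", "Taq"),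
   ("Vent", "Vent"),
   ("Vent DNA Polymerase", "Vent")]

-- the while-loop of Source B: halve [lo, hi) until the name is hit or the interval is empty;
-- fuel bounds the number of iterations (bTable.length + 1 always suffices, the interval shrinks each step)
def bsearch (polymerase : String) (fuel lo hi : Nat) : Option String :=
  match fuel with
  | 0 => none
  | fuel + 1 =>
    if lo < hi then
      match bTable[(lo + hi) / 2]? with
      | none => none   -- unreachable while [lo, hi) ⊆ [0, length): Python's indexing would not fail
      | some (name, key) =>
        if name == polymerase then some key
        else if PySem.Chars.strLt name.toList polymerase.toList then bsearch polymerase fuel ((lo + hi) / 2 + 1) hi  -- Python's 'name < polymerase' (code-point order, per PYSEM)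
        else bsearch polymerase fuel lo ((lo + hi) / 2)
    else none

def ChangeName_alt (polymerase : String) : Option String :=
  bsearch polymerase (bTable.length + 1) 0 bTable.length

-- ===== PRECONDITION & SPEC =====
def Spec_ChangeName (polymerase : String) (out : Option String) : Prop := out = ChangeName_alt polymerase
instance (polymerase : String) (out : Option String) : Decidable (Spec_ChangeName polymerase out) := by unfold Spec_ChangeName; infer_instance

-- ===== CLAIM (what is proved, stated in full; the proofs are below) =====
def Claim_equal_ChangeName : Prop := ∀ (polymerase : String), Dom_ChangeName polymerase → Spec_ChangeName polymerase (ChangeName polymerase)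

-- ===== LEMMAS AND PROOFS =====

-- soundness: a hit of the binary search is a table entry (no sortedness needed)
theorem bsearch_mem (fuel : Nat) : ∀ (lo hi : Nat) (p k : String),
    bsearch p fuel lo hi = some k → (p, k) ∈ bTable := by
  induction fuel with
  | zero => intro lo hi p k h; simp [bsearch] at h
  | succ fuel ih =>
      intro lo hi p k h
      simp only [bsearch] at h
      split at h
      · split at h
        · exact absurd h (by simp)
        · rename_i name key hm
          split at h
          · rename_i heq
            cases h
            exact List.mem_of_getElem? (by rw [hm, beq_iff_eq.mp heq])
          · split at h
            · exact ih _ _ _ _ h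
            · exact ih _ _ _ _ h
      · exact absurd h (by simp)

-- all names appearing in the table are elements of A's group lists and vice versa is
-- covered by the two decide facts used in the main proof below

-- the 32 names as A lists them (used only in the proof)
def aNames : List String :=
  ["Taq", "Taq DNA Polymerase", "Custom", "Custom Pfu",
   "SuperMix", "PCR SuperMix High Fidelity", "PCR SuperMix High Fidelity - Invitrogen/10790020", "Platinum PCR SuperMix High Fidelity", "Platinum SuperMix High Fidelity", "Platinum PCR SuperMix High Fidelity - Invitrogen/12532016",
   "Pfu", "QuikChange Lightning Enzyme", "Pfu Turbo", "PfuTurbo DNA Polymerase - Agilent/600250 ", "PfuUltra High-Fidelity DNA Polymerase", "PFU Ultra HF polymerase", "PfuTurbo Cx Hotstart DNA Polymerase",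
   "PhusionHF", "Phusion High-Fidelity PCR Master Mix with HF Buffer", "Phusion High-Fidelity PCR Master Mix with HF Buffer - NEB/M0531S", "Phusion DNA polymerase", "Phusion Hot Start II High-Fidelity DNA Polymerase", "Phusion HF master mix",
   "Vent", "Vent DNA Polymerase",
   "PrimeSTAR", "PrimeSTAR HS DNA Polymerase - Takara/R010A",
   "LongAmp", "LongAmp Taq DNA Polymerase - NEB/M0323S", "LongAmp Taq DNA Polymerase",
   "Q5", "Q5 High-Fidelity DNA Polymerase"]

set_option maxHeartbeats 4000000 in
theorem hit_agree : ∀ s ∈ aNames, ChangeName s = ChangeName_alt s := by decide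

theorem table_names : ∀ x ∈ bTable, x.1 ∈ aNames := by decide

set_option maxHeartbeats 1000000 in
theorem ChangeName_spec : Claim_equal_ChangeName := by
  intro p _
  unfold Spec_ChangeName
  by_cases hp : p ∈ aNames
  · exact hit_agree p hp
  · -- miss: B returns none by soundness, A returns none group by group
    have hb : ChangeName_alt p = none := by
      cases hres : ChangeName_alt p with
      | none => rfl
      | some k =>
          exact absurd (table_names _ (bsearch_mem _ _ _ _ _ hres)) hp
    rw [hb]
    simp only [aNames, List.mem_cons, List.not_mem_nil, or_false, not_or] at hp
    obtain ⟨h1,h2,h3,h4,h5,h6,h7,h8,h9,h10,h11,h12,h13,h14,h15,h16,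
            h17,h18,h19,h20,h21,h22,h23,h24,h25,h26,h27,h28,h29,h30,h31,h32⟩ := hp
    simp [ChangeName, pyScan, tryNext,
      Ne.symm h1, Ne.symm h2, Ne.symm h3, Ne.symm h4, Ne.symm h5, Ne.symm h6,
      Ne.symm h7, Ne.symm h8, Ne.symm h9, Ne.symm h10, Ne.symm h11, Ne.symm h12,
      Ne.symm h13, Ne.symm h14, Ne.symm h15, Ne.symm h16, Ne.symm h17, Ne.symm h18,
      Ne.symm h19, Ne.symm h20, Ne.symm h21, Ne.symm h22, Ne.symm h23, Ne.symm h24,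
      Ne.symm h25, Ne.symm h26, Ne.symm h27, Ne.symm h28, Ne.symm h29, Ne.symm h30,
      Ne.symm h31, Ne.symm h32]
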